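-- pv_equiv track=rewrite | github.com/fahmidhamim/WrapUp-AI | backend/analytics/engine.py | _tokenize_unicode
-- ===== SOURCE A (Python) =====
-- import unicodedata
--
-- def _tokenize_unicode(text: str) -> list[str]:
--     normalized = unicodedata.normalize("NFKC", text).casefold()
--     tokens: list[str] = []
--     current: list[str] = []
--     for char in normalized:
--         if char.isalnum():
--             current.append(char)
--         else:
--             if current:
--                 tokens.append("".join(current))
--                 current = []
--     if current:
--         tokens.append("".join(current))
--     return [token for token in tokens if token]
-- ===== SOURCE B (Python) =====
-- import unicodedata
--
-- def _tokenize_unicode(text: str) -> list[str]: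
--     normalized = unicodedata.normalize("NFKC", text).casefold()
--     masked = "".join(c if c.isalnum() else " " for c in normalized)
--     return masked.split()
-- ===== Notes on version B (the rewrite author's own statement) =====
-- stated objective: simpler
-- what changed: B is a staged pipeline: it first builds a masked string mapping every non-alphanumeric character to a space, then delegates all run-detection and empty-dropping to str.split(), eliminating A's explicit current-buffer state machine, its emit branches, the trailing flush and the final nonempty filter.
import Mathlib
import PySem

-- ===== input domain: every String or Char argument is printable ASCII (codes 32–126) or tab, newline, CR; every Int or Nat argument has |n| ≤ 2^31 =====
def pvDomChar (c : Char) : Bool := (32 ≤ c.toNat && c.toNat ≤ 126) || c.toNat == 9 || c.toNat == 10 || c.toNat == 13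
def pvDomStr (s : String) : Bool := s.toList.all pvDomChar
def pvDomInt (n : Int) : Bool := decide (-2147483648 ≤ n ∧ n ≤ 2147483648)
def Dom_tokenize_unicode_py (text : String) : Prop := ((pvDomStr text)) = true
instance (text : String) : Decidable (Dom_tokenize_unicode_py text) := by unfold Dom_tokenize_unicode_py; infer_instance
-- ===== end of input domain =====

-- B replaces A's single-pass current-buffer state machine with a staged pipeline: mask non-alnum
-- chars to spaces, then str.split() (objective: simpler).
-- On the ASCII domain, NFKC normalization is the identity and casefold = lower; both ports use PySem.Str.lower (exact there).

-- ===== PORT A =====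
-- A's loop body: append alnum chars to `current`, on a non-alnum char emit `current` if nonempty
def stepA_tok (st : List String × List Char) (c : Char) : List String × List Char :=
  if PySem.Chars.isalnum c then (st.1, st.2 ++ [c])
  else if st.2.isEmpty then st else (st.1 ++ [String.ofList st.2], [])

-- A's trailing `if current:` emit
def finA_tok (st : List String × List Char) : List String :=
  if st.2.isEmpty then st.1 else st.1 ++ [String.ofList st.2]

def tokenize_unicode_py (text : String) : List String :=
  (finA_tok (((PySem.Str.lower text).toList).foldl stepA_tok ([], []))).filter (fun t => !(t == ""))

-- ===== PORT B =====
-- the masking generator: c if c.isalnum() else " "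
def maskc_tok (c : Char) : Char := if PySem.Chars.isalnum c then c else ' '

def tokenize_unicode_py_alt (text : String) : List String :=
  PySem.Str.split₀ (String.ofList (((PySem.Str.lower text).toList).map maskc_tok))

-- ===== PRECONDITION & SPEC =====
def Spec_tokenize_unicode_py (text : String) (out : List String) : Prop := out = tokenize_unicode_py_alt text
instance (text : String) (out : List String) : Decidable (Spec_tokenize_unicode_py text out) := by unfold Spec_tokenize_unicode_py; infer_instance

-- ===== CLAIM (what is proved, stated in full; the proofs are below) =====
def Claim_equal_tokenize_unicode_py : Prop := ∀ (text : String), Dom_tokenize_unicode_py text → Spec_tokenize_unicode_py text (tokenize_unicode_py text)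

-- ===== LEMMAS AND PROOFS =====

-- alnum chars are never whitespace (both are ASCII-range predicates)
theorem isalnum_not_isspace (c : Char) (h : PySem.Chars.isalnum c = true) :
    PySem.Chars.isspace c = false := by
  simp [PySem.Chars.isalnum, PySem.Chars.isalpha, PySem.Chars.isupper, PySem.Chars.islower,
    PySem.Chars.isdigit] at h
  simp [PySem.Chars.isspace]
  have hA : ('A').val.toNat = 65 := by decide
  have hZ : ('Z').val.toNat = 90 := by decide
  have ha : ('a').val.toNat = 97 := by decide
  have hz : ('z').val.toNat = 122 := by decide
  have h0 : ('0').val.toNat = 48 := by decide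
  have h9 : ('9').val.toNat = 57 := by decide
  rcases h with (⟨h1, h2⟩ | ⟨h1, h2⟩) | ⟨h1, h2⟩ <;>
    simp only [Char.le_def, UInt32.le_iff_toNat_le] at h1 h2 <;>
    simp only [Char.toNat] <;> omega

-- split₀.go on the masked list computes exactly A's accumulator loop + trailing flush
theorem go_mask_eq (l : List Char) (acc : List String) (cur : List Char) :
    PySem.Chars.split₀.go (l.map maskc_tok) cur.reverse ((acc.map String.toList).reverse)
      = (finA_tok (l.foldl stepA_tok (acc, cur))).map String.toList := by
  induction l generalizing acc cur with
  | nil =>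
    simp only [List.map_nil, PySem.Chars.split₀.go, List.foldl_nil, finA_tok]
    by_cases hc : cur = []
    · subst hc; simp
    · simp [hc, List.isEmpty_iff]
  | cons c l ih =>
    by_cases hc : PySem.Chars.isalnum c = true
    · have hs : PySem.Chars.isspace c = false := isalnum_not_isspace c hc
      simp only [List.map_cons, maskc_tok, hc, if_true, PySem.Chars.split₀.go, hs,
        Bool.false_eq_true, if_false, List.foldl_cons, stepA_tok]
      have : c :: cur.reverse = (cur ++ [c]).reverse := by simp
      rw [this, ih acc (cur ++ [c])]
    · simp only [Bool.not_eq_true] at hc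
      have hsp : PySem.Chars.isspace ' ' = true := by decide
      simp only [List.map_cons, maskc_tok, hc, Bool.false_eq_true, if_false,
        PySem.Chars.split₀.go, hsp, if_true, List.foldl_cons, stepA_tok]
      by_cases hcur : cur = []
      · subst hcur
        simpa using ih acc []
      · have h1 : cur.reverse.isEmpty = false := by simp [List.isEmpty_iff, hcur]
        have h2 : cur.isEmpty = false := by simp [List.isEmpty_iff, hcur]
        simp only [h1, h2, Bool.false_eq_true, if_false]
        have : cur.reverse.reverse :: (acc.map String.toList).reverse
            = (((acc ++ [String.ofList cur]).map String.toList).reverse) := by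
          simp
        rw [this]
        simpa using ih (acc ++ [String.ofList cur]) []

-- every token A's loop produces is a nonempty string
theorem finA_nonempty (l : List Char) (acc : List String) (cur : List Char)
    (h : ∀ t ∈ acc, t ≠ "") :
    ∀ t ∈ finA_tok (l.foldl stepA_tok (acc, cur)), t ≠ "" := by
  induction l generalizing acc cur with
  | nil =>
    intro t ht
    simp only [List.foldl_nil, finA_tok] at ht
    by_cases hcur : cur = []
    · subst hcur; simp at ht; exact h t ht
    · simp [List.isEmpty_iff, hcur] at ht
      rcases ht with ht | ht
      · exact h t ht
      · subst ht
        intro he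
        have := congrArg String.toList he
        simp at this
        exact hcur this
  | cons c l ih =>
    intro t ht
    by_cases hc : PySem.Chars.isalnum c = true
    · simp only [List.foldl_cons, stepA_tok, hc, if_true] at ht
      exact ih acc (cur ++ [c]) h t ht
    · simp only [Bool.not_eq_true] at hc
      by_cases hcur : cur = []
      · subst hcur
        simp only [List.foldl_cons, stepA_tok, hc, Bool.false_eq_true, if_false,
          List.isEmpty_nil, if_true] at ht
        exact ih acc [] h t ht
      · have h2 : cur.isEmpty = false := by simp [List.isEmpty_iff, hcur]
        simp only [List.foldl_cons, stepA_tok, hc, Bool.false_eq_true, if_false, h2] at ht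
        refine ih (acc ++ [String.ofList cur]) [] ?_ t ht
        intro u hu
        rcases List.mem_append.mp hu with hu | hu
        · exact h u hu
        · simp at hu; subst hu
          intro he
          have := congrArg String.toList he
          simp at this
          exact hcur this

-- ===== VERDICT (by name: the statement is the Claim_ definition above) =====
theorem tokenize_unicode_py_spec : Claim_equal_tokenize_unicode_py := by
  intro text _
  show tokenize_unicode_py text = tokenize_unicode_py_alt text
  unfold tokenize_unicode_py tokenize_unicode_py_alt
  set l := (PySem.Str.lower text).toList with hl
  have hfilter : (finA_tok (l.foldl stepA_tok ([], []))).filter (fun t => !(t == ""))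
      = finA_tok (l.foldl stepA_tok ([], [])) := by
    apply List.filter_eq_self.mpr
    intro t ht
    have := finA_nonempty l [] [] (by simp) t ht
    simpa using this
  rw [hfilter]
  have hgo := go_mask_eq l [] []
  simp only [List.map_nil, List.reverse_nil] at hgo
  have : PySem.Str.split₀ (String.ofList (l.map maskc_tok))
      = (PySem.Chars.split₀.go (l.map maskc_tok) [] []).map String.ofList := by
    simp [PySem.Str.split₀, PySem.Chars.split₀]
  rw [this, hgo, List.map_map]
  simp [Function.comp_def, String.ofList_toList]
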